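-- pv_equiv track=rewrite | github.com/julie-berlin/pub-aie7-dynamic-leadgen | backend/app/graphs/supervisors/lead_intelligence_supervisor.py | _identify_engagement_indicators
-- ===== SOURCE A (Python) =====
-- from typing import Dict, Any, List, Optional, Tuple
--
-- def _identify_engagement_indicators(responses: List[Dict[str, Any]]) -> List[str]:
--     """Identify indicators of strong engagement."""
--     indicators = []
--
--     for response in responses:
--         answer = response.get('answer', '').lower()
--
--         if len(answer) > 100:
--             indicators.append("detailed_responses")
--
--         if any(word in answer for word in ['excited', 'interested', 'looking forward', 'definitely']):
--             indicators.append("enthusiasm_expressions")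
--
--         if any(word in answer for word in ['question', 'wondering', 'curious', 'tell me']):
--             indicators.append("active_inquiry")
--
--         if answer.count('!') > 1:
--             indicators.append("high_enthusiasm_punctuation")
--
--     return list(set(indicators))  # Remove duplicates
-- ===== SOURCE B (Python) =====
-- def _identify_engagement_indicators(responses):
--     """Identify indicators of strong engagement (rule-table re-implementation)."""
--     answers = [r.get('answer', '').lower() for r in responses]
--     rules = [
--         ("detailed_responses", lambda a: len(a) > 100),
--         ("enthusiasm_expressions", lambda a: any(w in a for w in ['excited', 'interested', 'looking forward', 'definitely'])),
--         ("active_inquiry", lambda a: any(w in a for w in ['question', 'wondering', 'curious', 'tell me'])),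
--         ("high_enthusiasm_punctuation", lambda a: a.count('!') > 1),
--     ]
--     tags = set()
--     for tag, pred in rules:
--         if any(pred(a) for a in answers):
--             tags.add(tag)
--     return sorted(tags)
-- ===== Notes on version B (the rewrite author's own statement) =====
-- stated objective: alternative
-- what changed: Inverts the loop nesting: lowers all answers once, then checks each of the four indicator rules with a single any() over the answers and adds its tag at most once, instead of A's per-response inline branches that append duplicate tags and dedupe with list(set(...)) at the end; the tag set is returned (CPython's set iteration order is unspecified, so the result is compared as a set).
import Mathlib
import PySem

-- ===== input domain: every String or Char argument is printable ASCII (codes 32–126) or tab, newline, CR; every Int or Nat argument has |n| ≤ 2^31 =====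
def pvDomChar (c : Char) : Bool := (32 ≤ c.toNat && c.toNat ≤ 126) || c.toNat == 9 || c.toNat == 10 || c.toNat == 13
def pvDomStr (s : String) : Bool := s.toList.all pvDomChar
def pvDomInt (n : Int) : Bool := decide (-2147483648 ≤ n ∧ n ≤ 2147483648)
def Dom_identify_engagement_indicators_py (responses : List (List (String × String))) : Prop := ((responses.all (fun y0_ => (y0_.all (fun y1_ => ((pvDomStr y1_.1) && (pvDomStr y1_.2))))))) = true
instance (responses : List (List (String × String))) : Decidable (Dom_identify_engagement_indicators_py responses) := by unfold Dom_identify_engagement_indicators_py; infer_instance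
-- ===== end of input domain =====

-- B inverts the loop nesting (lower all answers once, then one any() pass per indicator rule into a set);
-- objective: alternative decomposition, same cost. CPython's list(set(...)) / set iteration order is
-- hash-randomized and unspecified, so both ports canonicalize the returned tag set to sorted order
-- (outputs are compared as sets; B's Python returns sorted(tags)).

-- ===== PORT A =====
def identify_engagement_indicators_py (responses : List (List (String × String))) : List String :=
  let indicators : List String :=
    responses.foldl (fun indicators response =>
      let answer := PySem.Str.lower ((PySem.Dict.mk response).getD "answer" "")
      let indicators := if 100 < PySem.Str.len answer then indicators ++ ["detailed_responses"] else indicators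
      let indicators := if ["excited", "interested", "looking forward", "definitely"].any (fun word => PySem.Str.isIn word answer) then indicators ++ ["enthusiasm_expressions"] else indicators
      let indicators := if ["question", "wondering", "curious", "tell me"].any (fun word => PySem.Str.isIn word answer) then indicators ++ ["active_inquiry"] else indicators
      let indicators := if 1 < PySem.Str.count answer "!" then indicators ++ ["high_enthusiasm_punctuation"] else indicators
      indicators) []
  -- list(set(indicators)): set order is unspecified in CPython, canonicalized to sorted order here
  PySem.List.sorted (PySem.Set.ofList indicators) (fun x => x)

-- ===== PORT B =====
def identify_engagement_indicators_py_alt (responses : List (List (String × String))) : List String :=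
  let answers := responses.map (fun r => PySem.Str.lower ((PySem.Dict.mk r).getD "answer" ""))
  let rules : List (String × (String → Bool)) :=
    [("detailed_responses", fun a => decide (100 < PySem.Str.len a)),
     ("enthusiasm_expressions", fun a => ["excited", "interested", "looking forward", "definitely"].any (fun w => PySem.Str.isIn w a)),
     ("active_inquiry", fun a => ["question", "wondering", "curious", "tell me"].any (fun w => PySem.Str.isIn w a)),
     ("high_enthusiasm_punctuation", fun a => decide (1 < PySem.Str.count a "!"))]
  let tags : PySem.Set String :=
    rules.foldl (fun tags rule => if answers.any rule.2 then PySem.Set.add tags rule.1 else tags) (PySem.Set.ofList [])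
  PySem.List.sorted tags (fun x => x)

-- ===== PRECONDITION & SPEC =====
def Spec_identify_engagement_indicators_py (responses : List (List (String × String))) (out : List String) : Prop := out = identify_engagement_indicators_py_alt responses
instance (responses : List (List (String × String))) (out : List String) : Decidable (Spec_identify_engagement_indicators_py responses out) := by unfold Spec_identify_engagement_indicators_py; infer_instance

-- ===== CLAIM (what is proved, stated in full; the proofs are below) =====
def Claim_equal_identify_engagement_indicators_py : Prop := ∀ (responses : List (List (String × String))), Dom_identify_engagement_indicators_py responses → Spec_identify_engagement_indicators_py responses (identify_engagement_indicators_py responses)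

-- ===== LEMMAS AND PROOFS =====

-- the lowered answer of one response, and the tags A appends for it (in A's branch order)
def pvAns (r : List (String × String)) : String :=
  PySem.Str.lower ((PySem.Dict.mk r).getD "answer" "")

def pvTags (r : List (String × String)) : List String :=
  (if 100 < PySem.Str.len (pvAns r) then ["detailed_responses"] else []) ++
  (if ["excited", "interested", "looking forward", "definitely"].any (fun w => PySem.Str.isIn w (pvAns r)) then ["enthusiasm_expressions"] else []) ++
  (if ["question", "wondering", "curious", "tell me"].any (fun w => PySem.Str.isIn w (pvAns r)) then ["active_inquiry"] else []) ++
  (if 1 < PySem.Str.count (pvAns r) "!" then ["high_enthusiasm_punctuation"] else [])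

set_option maxHeartbeats 1000000 in
lemma body_eq (acc : List String) (r : List (String × String)) :
    (let answer := PySem.Str.lower ((PySem.Dict.mk r).getD "answer" "")
      let indicators := if 100 < PySem.Str.len answer then acc ++ ["detailed_responses"] else acc
      let indicators := if ["excited", "interested", "looking forward", "definitely"].any (fun word => PySem.Str.isIn word answer) then indicators ++ ["enthusiasm_expressions"] else indicators
      let indicators := if ["question", "wondering", "curious", "tell me"].any (fun word => PySem.Str.isIn word answer) then indicators ++ ["active_inquiry"] else indicators
      let indicators := if 1 < PySem.Str.count answer "!" then indicators ++ ["high_enthusiasm_punctuation"] else indicators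
      indicators) = acc ++ pvTags r := by
  simp only [pvTags, pvAns]
  split_ifs <;> simp

set_option maxHeartbeats 1000000 in
lemma foldA (responses : List (List (String × String))) :
    responses.foldl (fun indicators response =>
      let answer := PySem.Str.lower ((PySem.Dict.mk response).getD "answer" "")
      let indicators := if 100 < PySem.Str.len answer then indicators ++ ["detailed_responses"] else indicators
      let indicators := if ["excited", "interested", "looking forward", "definitely"].any (fun word => PySem.Str.isIn word answer) then indicators ++ ["enthusiasm_expressions"] else indicators
      let indicators := if ["question", "wondering", "curious", "tell me"].any (fun word => PySem.Str.isIn word answer) then indicators ++ ["active_inquiry"] else indicators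
      let indicators := if 1 < PySem.Str.count answer "!" then indicators ++ ["high_enthusiasm_punctuation"] else indicators
      indicators) [] = responses.flatMap pvTags := by
  rw [PySem.List.foldl_congr_mem _ _
      (fun acc r => acc ++ pvTags r) _
      (fun acc r _ => body_eq acc r)]
  simpa using PySem.List.foldl_append_eq_flatMap pvTags responses []

set_option maxHeartbeats 1000000 in
lemma mem_pvTags (r : List (String × String)) (x : String) :
    x ∈ pvTags r ↔
      ((100 < PySem.Str.len (pvAns r) ∧ x = "detailed_responses" ∨
        (["excited", "interested", "looking forward", "definitely"].any (fun w => PySem.Str.isIn w (pvAns r))) = true ∧ x = "enthusiasm_expressions") ∨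
        (["question", "wondering", "curious", "tell me"].any (fun w => PySem.Str.isIn w (pvAns r))) = true ∧ x = "active_inquiry") ∨
        1 < PySem.Str.count (pvAns r) "!" ∧ x = "high_enthusiasm_punctuation" := by
  simp only [pvTags, List.mem_append, List.mem_ite_nil_right, List.mem_singleton]

-- a ∈-characterization of one conditional Set.add step of B's rule loop
lemma mem_step {c : Prop} [Decidable c] (s : PySem.Set String) (t x : String) :
    x ∈ (if c then PySem.Set.add s t else s) ↔ x ∈ s ∨ (c ∧ x = t) := by
  split_ifs with h <;> simp [PySem.Set.mem_add, h]

lemma nodup_step {c : Prop} [Decidable c] {s : PySem.Set String} {t : String}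
    (h : List.Nodup s) : List.Nodup (if c then PySem.Set.add s t else s) := by
  split_ifs
  · exact PySem.Set.nodup_add s t h
  · exact h

-- distribute '∃ r ∈ l, ⋁ (Pk r ∧ Ak)' over the disjunction
lemma exists_dist {α : Type} {l : List α} {P1 P2 P3 P4 : α → Prop} {A B C D : Prop} :
    (∃ r ∈ l, ((P1 r ∧ A ∨ P2 r ∧ B) ∨ P3 r ∧ C) ∨ P4 r ∧ D) ↔
    (((∃ r ∈ l, P1 r) ∧ A ∨ (∃ r ∈ l, P2 r) ∧ B) ∨ (∃ r ∈ l, P3 r) ∧ C) ∨ (∃ r ∈ l, P4 r) ∧ D := by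
  constructor
  · rintro ⟨r, hr, ((⟨h, a⟩ | ⟨h, a⟩) | ⟨h, a⟩) | ⟨h, a⟩⟩
    · exact Or.inl (Or.inl (Or.inl ⟨⟨r, hr, h⟩, a⟩))
    · exact Or.inl (Or.inl (Or.inr ⟨⟨r, hr, h⟩, a⟩))
    · exact Or.inl (Or.inr ⟨⟨r, hr, h⟩, a⟩)
    · exact Or.inr ⟨⟨r, hr, h⟩, a⟩
  · rintro (((⟨⟨r, hr, h⟩, a⟩ | ⟨⟨r, hr, h⟩, a⟩) | ⟨⟨r, hr, h⟩, a⟩) | ⟨⟨r, hr, h⟩, a⟩)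
    · exact ⟨r, hr, Or.inl (Or.inl (Or.inl ⟨h, a⟩))⟩
    · exact ⟨r, hr, Or.inl (Or.inl (Or.inr ⟨h, a⟩))⟩
    · exact ⟨r, hr, Or.inl (Or.inr ⟨h, a⟩)⟩
    · exact ⟨r, hr, Or.inr ⟨h, a⟩⟩

set_option maxHeartbeats 2000000 in
theorem main_eq (responses : List (List (String × String))) :
    identify_engagement_indicators_py responses = identify_engagement_indicators_py_alt responses := by
  unfold identify_engagement_indicators_py identify_engagement_indicators_py_alt
  rw [foldA]
  dsimp only
  simp only [List.foldl_cons, List.foldl_nil]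
  refine PySem.List.eq_of_perm_of_pairwise_le_of_injective (fun x => x) (fun a b h => h) ?_
    (PySem.List.sorted_pairwise _ _) (PySem.List.sorted_pairwise _ _)
  refine ((PySem.List.sorted_perm _ _ _).trans ?_).trans (PySem.List.sorted_perm _ _ _).symm
  rw [List.perm_ext_iff_of_nodup (PySem.Set.nodup_ofList _)
      (nodup_step (nodup_step (nodup_step (nodup_step (PySem.Set.nodup_ofList [])))))]
  intro x
  simp only [PySem.Set.mem_ofList, List.mem_flatMap, mem_pvTags, pvAns, mem_step,
    List.any_map, Function.comp_def, List.any_eq_true, decide_eq_true_eq,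
    List.not_mem_nil, false_or]
  rw [exists_dist]

-- ===== VERDICT (by name: the statement is the Claim_ definition above) =====
theorem identify_engagement_indicators_py_spec : Claim_equal_identify_engagement_indicators_py := by
  intro responses _
  unfold Spec_identify_engagement_indicators_py
  exact main_eq responses
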